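-- pv_equiv track=rewrite | github.com/oliver-ni/advent-of-code | py/2022/day22.py | move1
-- ===== SOURCE A (Python) =====
-- DIRECTIONS = [(0, 1), (1, 0), (0, -1), (-1, 0)]
--
-- def add_tuple(a, b):
--     return tuple(x + y for x, y in zip(a, b))
--
-- def move1(grid, d, i, j):
--     ni, nj = i, j
--
--     while True:
--         ni, nj = add_tuple((ni, nj), DIRECTIONS[d])
--         ni %= 200
--         nj %= 150
--         if (ni, nj) in grid:
--             break
--
--     if grid[ni, nj] == "#":
--         return i, j
--
--     return ni, nj
-- ===== SOURCE B (Python) =====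
-- DIRECTIONS = [(0, 1), (1, 0), (0, -1), (-1, 0)]
--
-- def move1(grid, d, i, j):
--     di, dj = DIRECTIONS[d]
--     if di == 0:
--         r = i % 200
--         line = [c for c in range(150) if (r, c) in grid]
--         c0 = j % 150
--         if dj == 1:
--             nc = min((c for c in line if c > c0), default=min(line))
--         else:
--             nc = max((c for c in line if c < c0), default=max(line))
--         ni, nj = r, nc
--     else:
--         c = j % 150
--         line = [r for r in range(200) if (r, c) in grid]
--         r0 = i % 200
--         if di == 1:
--             nr = min((r for r in line if r > r0), default=min(line))
--         else:
--             nr = max((r for r in line if r < r0), default=max(line))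
--         ni, nj = nr, c
--     if grid[ni, nj] == "#":
--         return i, j
--     return ni, nj
-- ===== Notes on version B (the rewrite author's own statement) =====
-- stated objective: alternative
-- what changed: A steps cell by cell around the torus until it hits an occupied cell; B builds the ordered list of occupied cells on the line of motion once and picks the cyclic successor/predecessor with min/max over that list.
import Mathlib
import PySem

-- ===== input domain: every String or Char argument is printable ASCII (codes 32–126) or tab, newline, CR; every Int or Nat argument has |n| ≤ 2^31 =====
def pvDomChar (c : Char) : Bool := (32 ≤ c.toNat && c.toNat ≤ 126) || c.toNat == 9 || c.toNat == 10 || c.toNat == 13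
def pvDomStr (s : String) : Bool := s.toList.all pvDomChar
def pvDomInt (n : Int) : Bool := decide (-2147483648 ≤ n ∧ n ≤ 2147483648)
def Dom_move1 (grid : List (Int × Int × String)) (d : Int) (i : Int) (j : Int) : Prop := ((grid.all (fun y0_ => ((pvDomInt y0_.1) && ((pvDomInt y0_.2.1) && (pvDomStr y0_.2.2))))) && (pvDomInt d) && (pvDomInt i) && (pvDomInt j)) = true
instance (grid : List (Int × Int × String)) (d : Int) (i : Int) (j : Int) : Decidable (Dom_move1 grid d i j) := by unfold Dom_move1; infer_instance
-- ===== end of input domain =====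

-- B replaces A's step-by-step wrap-around scan by building the occupied line once and
-- picking the cyclic successor with min/max (objective: alternative decomposition).

-- shared dict primitives (grid is a Python dict keyed by (i, j) pairs)
def pvDirs : List (Int × Int) := [(0, 1), (1, 0), (0, -1), (-1, 0)]

-- grid[p] : first matching key (dict lookup)
def pvGridGet? (grid : List (Int × Int × String)) (p : Int × Int) : Option String :=
  match grid with
  | [] => none
  | (a, b, v) :: t => if a = p.1 ∧ b = p.2 then some v else pvGridGet? t p

-- p in grid : key membership
def pvGridMem (grid : List (Int × Int × String)) (p : Int × Int) : Bool :=
  (pvGridGet? grid p).isSome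

-- ===== PORT A =====
-- the 'while True' loop; fuel 400 covers a full wrap of either axis (Pre_ guarantees a hit
-- within 200 steps; on fuel exhaustion — only outside Pre_, where Python loops forever —
-- the current state is returned)
def move1Loop (grid : List (Int × Int × String)) (di dj : Int) : Nat → Int → Int → Int × Int
  | 0, ni, nj => (ni, nj)
  | fuel+1, ni, nj =>
    let ni' := PySem.Int.mod (ni + di) 200
    let nj' := PySem.Int.mod (nj + dj) 150
    if pvGridMem grid (ni', nj') then (ni', nj') else move1Loop grid di dj fuel ni' nj'

def move1 (grid : List (Int × Int × String)) (d : Int) (i : Int) (j : Int) : Int × Int :=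
  match PySem.List.pyGet? pvDirs d with
  | none => (i, j)   -- DIRECTIONS[d] IndexError; excluded by Pre_move1
  | some (di, dj) =>
    let p := move1Loop grid di dj 400 i j
    if pvGridGet? grid p = some "#" then (i, j) else p

-- ===== PORT B =====
-- min((c for c in line if c > c0), default=min(line)); 'min(line)' on an empty line raises
-- ValueError in Python (excluded by Pre_move1), here .getD 0
def pvNextUp (line : List Int) (c0 : Int) : Int :=
  match PySem.List.min? (line.filter (fun c => c0 < c)) (fun x => x) with
  | some m => m
  | none => (PySem.List.min? line (fun x => x)).getD 0

def pvNextDown (line : List Int) (c0 : Int) : Int :=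
  match PySem.List.max? (line.filter (fun c => c < c0)) (fun x => x) with
  | some m => m
  | none => (PySem.List.max? line (fun x => x)).getD 0

def move1_alt (grid : List (Int × Int × String)) (d : Int) (i : Int) (j : Int) : Int × Int :=
  match PySem.List.pyGet? pvDirs d with
  | none => (i, j)   -- DIRECTIONS[d] IndexError; excluded by Pre_move1
  | some (di, dj) =>
    let p :=
      if di = 0 then
        let r := PySem.Int.mod i 200
        let line := (PySem.List.pyRange 0 150 1).filter (fun c => pvGridMem grid (r, c))
        let c0 := PySem.Int.mod j 150
        (r, if dj = 1 then pvNextUp line c0 else pvNextDown line c0)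
      else
        let c := PySem.Int.mod j 150
        let line := (PySem.List.pyRange 0 200 1).filter (fun r => pvGridMem grid (r, c))
        let r0 := PySem.Int.mod i 200
        ((if di = 1 then pvNextUp line r0 else pvNextDown line r0), c)
    if pvGridGet? grid p = some "#" then (i, j) else p

-- ===== PRECONDITION & SPEC =====
-- Pre_ excludes exactly the inputs where A does not return: d outside [-4, 3] (IndexError
-- on DIRECTIONS[d]) and grids with no occupied cell on the wrapped line of motion (A's
-- while-loop never terminates there).
def Pre_move1 (grid : List (Int × Int × String)) (d : Int) (i : Int) (j : Int) : Prop :=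
  (-4 ≤ d ∧ d ≤ 3) ∧
  (if PySem.Int.mod d 2 = 0
   then ∃ e ∈ grid, e.1 = PySem.Int.mod i 200 ∧ 0 ≤ e.2.1 ∧ e.2.1 < 150
   else ∃ e ∈ grid, e.2.1 = PySem.Int.mod j 150 ∧ 0 ≤ e.1 ∧ e.1 < 200)
instance (grid : List (Int × Int × String)) (d : Int) (i : Int) (j : Int) : Decidable (Pre_move1 grid d i j) := by unfold Pre_move1; infer_instance

def pvWitness_move1 : (List (Int × Int × String)) × Int × Int × Int := ([(0, 0, ".")], 0, 0, 0)

def Spec_move1 (grid : List (Int × Int × String)) (d : Int) (i : Int) (j : Int) (out : Int × Int) : Prop := out = move1_alt grid d i j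
instance (grid : List (Int × Int × String)) (d : Int) (i : Int) (j : Int) (out : Int × Int) : Decidable (Spec_move1 grid d i j out) := by unfold Spec_move1; infer_instance

-- ===== CLAIM (what is proved, stated in full; the proofs are below) =====
def Claim_equal_move1 : Prop := ∀ (grid : List (Int × Int × String)) (d : Int) (i : Int) (j : Int), Dom_move1 grid d i j → Pre_move1 grid d i j → Spec_move1 grid d i j (move1 grid d i j)

-- ===== LEMMAS AND PROOFS =====

lemma pm150 (a : Int) : PySem.Int.mod a 150 = a % 150 := PySem.Int.mod_eq_emod_of_pos (by norm_num)
lemma pm200 (a : Int) : PySem.Int.mod a 200 = a % 200 := PySem.Int.mod_eq_emod_of_pos (by norm_num)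

lemma emod_eq_sub' (m a : Int) (h1 : m ≤ a) (h2 : a < 2 * m) : a % m = a - m := by
  have h : (a - m + m * 1) % m = (a - m) % m := Int.add_mul_emod_self_left (a - m) m 1
  have e : a - m + m * 1 = a := by ring
  rw [e] at h
  rw [h, Int.emod_eq_of_lt (by omega) (by omega)]

lemma emod_eq_add' (m a : Int) (h1 : -m ≤ a) (h2 : a < 0) : a % m = a + m := by
  have h : (a + m * 1) % m = a % m := Int.add_mul_emod_self_left a m 1
  have e : a + m * 1 = a + m := by ring
  rw [e] at h
  rw [← h, Int.emod_eq_of_lt (by omega) (by omega)]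

lemma pvGridMem_of_mem (grid : List (Int × Int × String)) (a b : Int) (v : String)
    (h : (a, b, v) ∈ grid) : pvGridMem grid (a, b) = true := by
  induction grid with
  | nil => cases h
  | cons e t ih =>
    obtain ⟨ea, eb, ev⟩ := e
    simp only [pvGridMem, pvGridGet?] at *
    rcases List.mem_cons.1 h with h | h
    · simp_all
    · split
      · simp
      · exact ih h

lemma find?_eq_head?_filter {α : Type} (p : α → Bool) (l : List α) :
    l.find? p = (l.filter p).head? := by
  induction l with
  | nil => rfl
  | cons a t ih =>
    by_cases h : p a = true
    · rw [List.find?_cons_of_pos h, List.filter_cons_of_pos h, List.head?_cons]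
    · simp only [Bool.not_eq_true] at h
      rw [List.find?_cons_of_neg (by simp [h]), List.filter_cons_of_neg (by simp [h]), ih]

lemma foldl_min_eq (t : List Int) : ∀ x : Int, (∀ y ∈ t, x ≤ y) → t.foldl min x = x := by
  induction t with
  | nil => intro x _; rfl
  | cons a t ih =>
    intro x h
    simp only [List.foldl_cons]
    rw [min_eq_left (h a (by simp))]
    exact ih x (fun y hy => h y (by simp [hy]))

lemma min?_id_sorted (l : List Int) (h : l.Pairwise (· < ·)) :
    PySem.List.min? l (fun x => x) = l.head? := by
  cases l with
  | nil => rw [List.head?_nil]; exact (PySem.List.min?_eq_none_iff _ _).2 rfl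
  | cons x t =>
    rw [PySem.List.min?_id_cons]
    rw [foldl_min_eq t x (fun y hy => le_of_lt ((List.pairwise_cons.1 h).1 y hy))]
    rfl

lemma foldl_max_eq (t : List Int) : ∀ x : Int, (∀ y ∈ t, x ≤ y) → t.Pairwise (· ≤ ·) →
    t.foldl max x = (t.getLast?).getD x := by
  induction t with
  | nil => intro x _ _; rfl
  | cons a t ih =>
    intro x h hp
    simp only [List.foldl_cons]
    rw [max_eq_right (h a (by simp))]
    rw [ih a (fun y hy => (List.pairwise_cons.1 hp).1 y hy) (List.pairwise_cons.1 hp).2]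
    cases t with
    | nil => rfl
    | cons b t' =>
      rw [List.getLast?_cons_cons]
      have hs : (b :: t').getLast?.isSome := by simp
      obtain ⟨w, hw⟩ := Option.isSome_iff_exists.1 hs
      simp [hw]

lemma max?_id_sorted (l : List Int) (h : l.Pairwise (· < ·)) :
    PySem.List.max? l (fun x => x) = l.getLast? := by
  cases l with
  | nil => rw [List.getLast?_nil]; exact (PySem.List.max?_eq_none_iff _ _).2 rfl
  | cons x t =>
    rw [PySem.List.max?_id_cons]
    have hp := List.pairwise_cons.1 h
    rw [foldl_max_eq t x (fun y hy => le_of_lt (hp.1 y hy)) (hp.2.imp (fun h => le_of_lt h))]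
    cases t with
    | nil => rfl
    | cons b t' =>
      rw [List.getLast?_cons_cons]
      have hs : (b :: t').getLast?.isSome := by simp
      obtain ⟨w, hw⟩ := Option.isSome_iff_exists.1 hs
      simp [hw]

-- the while-loop visits exactly this candidate list and returns its first grid hit
def candList (di dj : Int) : Nat → Int → Int → List (Int × Int)
  | 0, _, _ => []
  | fuel+1, ni, nj =>
    ((ni + di) % 200, (nj + dj) % 150) :: candList di dj fuel ((ni + di) % 200) ((nj + dj) % 150)

lemma loop_finds (grid : List (Int × Int × String)) (di dj : Int) :
    ∀ (fuel : Nat) (ni nj : Int) (v : Int × Int),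
    (candList di dj fuel ni nj).find? (fun p => pvGridMem grid p) = some v →
    move1Loop grid di dj fuel ni nj = v := by
  intro fuel
  induction fuel with
  | zero => intro ni nj v h; simp [candList] at h
  | succ fuel ih =>
    intro ni nj v h
    simp only [candList, List.find?_cons] at h
    simp only [move1Loop, pm150, pm200]
    by_cases hm : pvGridMem grid ((ni + di) % 200, (nj + dj) % 150) = true
    · rw [hm] at h
      simp only [if_pos hm]
      exact Option.some_inj.1 h
    · simp only [Bool.not_eq_true] at hm
      rw [hm] at h
      have hne : ¬ (pvGridMem grid ((ni + di) % 200, (nj + dj) % 150) = true) := by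
        rw [hm]; exact Bool.false_ne_true
      simp only [if_neg hne]
      exact ih _ _ _ h

lemma cand_hu : ∀ (fuel : Nat) (i j : Int),
    candList 0 1 fuel i j = (List.range fuel).map (fun (k : Nat) => (i % 200, (j + 1 + (k : Int)) % 150)) := by
  intro fuel
  induction fuel with
  | zero => intro i j; rfl
  | succ fuel ih =>
    intro i j
    rw [List.range_succ_eq_map, List.map_cons, List.map_map]
    simp only [candList, ih]
    congr 1
    · simp only [Prod.mk.injEq]
      constructor <;> push_cast <;> omega
    · apply List.map_congr_left
      intro k _
      simp only [Function.comp_apply, Prod.mk.injEq]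
      constructor <;> push_cast <;> omega

lemma cand_hd : ∀ (fuel : Nat) (i j : Int),
    candList 0 (-1) fuel i j = (List.range fuel).map (fun (k : Nat) => (i % 200, (j - 1 - (k : Int)) % 150)) := by
  intro fuel
  induction fuel with
  | zero => intro i j; rfl
  | succ fuel ih =>
    intro i j
    rw [List.range_succ_eq_map, List.map_cons, List.map_map]
    simp only [candList, ih]
    congr 1
    · simp only [Prod.mk.injEq]
      constructor <;> push_cast <;> omega
    · apply List.map_congr_left
      intro k _
      simp only [Function.comp_apply, Prod.mk.injEq]
      constructor <;> push_cast <;> omega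

lemma cand_vu : ∀ (fuel : Nat) (i j : Int),
    candList 1 0 fuel i j = (List.range fuel).map (fun (k : Nat) => ((i + 1 + (k : Int)) % 200, j % 150)) := by
  intro fuel
  induction fuel with
  | zero => intro i j; rfl
  | succ fuel ih =>
    intro i j
    rw [List.range_succ_eq_map, List.map_cons, List.map_map]
    simp only [candList, ih]
    congr 1
    · simp only [Prod.mk.injEq]
      constructor <;> push_cast <;> omega
    · apply List.map_congr_left
      intro k _
      simp only [Function.comp_apply, Prod.mk.injEq]
      constructor <;> push_cast <;> omega

lemma cand_vd : ∀ (fuel : Nat) (i j : Int),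
    candList (-1) 0 fuel i j = (List.range fuel).map (fun (k : Nat) => ((i - 1 - (k : Int)) % 200, j % 150)) := by
  intro fuel
  induction fuel with
  | zero => intro i j; rfl
  | succ fuel ih =>
    intro i j
    rw [List.range_succ_eq_map, List.map_cons, List.map_map]
    simp only [candList, ih]
    congr 1
    · simp only [Prod.mk.injEq]
      constructor <;> push_cast <;> omega
    · apply List.map_congr_left
      intro k _
      simp only [Function.comp_apply, Prod.mk.injEq]
      constructor <;> push_cast <;> omega

-- extending the scanned prefix does not change the first hit
lemma find?_range_mono {α : Type} (p : α → Bool) (f : Nat → α) (n N : Nat) (hn : n ≤ N) (v : α)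
    (h : ((List.range n).map f).find? p = some v) :
    ((List.range N).map f).find? p = some v := by
  have e : N = n + (N - n) := by omega
  rw [e, List.range_add, List.map_append, List.find?_append, h]
  rfl

-- core cyclic-successor lemma, upward scan, modulus m
lemma core_up (m : Int) (hm : 0 < m) (q : Int → Bool) (j : Int)
    (hex : ∃ c, 0 ≤ c ∧ c < m ∧ q c = true) :
    ((List.range m.toNat).map (fun (k : Nat) => (j + 1 + (k : Int)) % m)).find? q
      = some (pvNextUp ((PySem.List.pyRange 0 m 1).filter q) (j % m)) := by
  set c0 := j % m with hc0
  have hc00 : 0 ≤ c0 := Int.emod_nonneg j (by omega)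
  have hc01 : c0 < m := Int.emod_lt_of_pos j hm
  have hshift : ∀ t : Int, (j + t) % m = (c0 + t) % m := fun t => (Int.emod_add_emod j m t).symm
  have hsplit : (List.range m.toNat).map (fun (k : Nat) => (j + 1 + (k : Int)) % m)
      = PySem.List.pyRange (c0 + 1) m 1 ++ PySem.List.pyRange 0 (c0 + 1) 1 := by
    apply List.ext_getElem
    · simp [PySem.List.length_pyRange_one]; omega
    · intro k h1 h2
      simp only [List.getElem_map, List.getElem_range]
      have hkm : k < m.toNat := by simpa using h1
      have e1 : j + 1 + (k : Int) = j + (1 + k) := by ring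
      by_cases hk : k < (m - (c0 + 1)).toNat
      · rw [List.getElem_append_left (by simp [List.length_reverse, PySem.List.length_pyRange_one]; omega)]
        rw [PySem.List.getElem_pyRange_one]
        rw [e1, hshift, Int.emod_eq_of_lt (by omega) (by omega)]
        ring
      · rw [List.getElem_append_right (by simp [List.length_reverse, PySem.List.length_pyRange_one]; omega)]
        rw [PySem.List.getElem_pyRange_one]
        rw [e1, hshift, emod_eq_sub' m _ (by omega) (by omega)]
        simp only [List.length_reverse, PySem.List.length_pyRange_one]
        omega
  rw [hsplit, List.find?_append]
  have hRsplit : PySem.List.pyRange 0 m 1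
      = PySem.List.pyRange 0 (c0 + 1) 1 ++ PySem.List.pyRange (c0 + 1) m 1 :=
    PySem.List.pyRange_one_append 0 (c0 + 1) m (by omega) (by omega)
  have hPW1 : ((PySem.List.pyRange (c0 + 1) m 1).filter q).Pairwise (· < ·) :=
    List.Pairwise.sublist List.filter_sublist (PySem.List.pairwise_lt_pyRange_one ..)
  have hPW2 : ((PySem.List.pyRange 0 (c0 + 1) 1).filter q).Pairwise (· < ·) :=
    List.Pairwise.sublist List.filter_sublist (PySem.List.pairwise_lt_pyRange_one ..)
  have hup : ((PySem.List.pyRange 0 m 1).filter q).filter (fun c => decide (c0 < c))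
      = (PySem.List.pyRange (c0 + 1) m 1).filter q := by
    rw [hRsplit, List.filter_append, List.filter_append]
    have hz : ((PySem.List.pyRange 0 (c0 + 1) 1).filter q).filter (fun c => decide (c0 < c)) = [] := by
      apply List.filter_eq_nil_iff.2
      intro a ha
      have hmem := PySem.List.mem_pyRange_one.1 (List.mem_of_mem_filter ha)
      simp; omega
    have hs : ((PySem.List.pyRange (c0 + 1) m 1).filter q).filter (fun c => decide (c0 < c))
        = (PySem.List.pyRange (c0 + 1) m 1).filter q := by
      apply List.filter_eq_self.2
      intro a ha
      have hmem := PySem.List.mem_pyRange_one.1 (List.mem_of_mem_filter ha)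
      simp; omega
    rw [hz, hs, List.nil_append]
  rw [find?_eq_head?_filter, find?_eq_head?_filter]
  unfold pvNextUp
  rw [hup]
  clear hup
  cases hA1c : (PySem.List.pyRange (c0 + 1) m 1).filter q with
  | cons x t =>
    rw [min?_id_sorted _ (hA1c ▸ hPW1)]
    simp
  | nil =>
    rw [show PySem.List.min? ([] : List Int) (fun x => x) = none from (PySem.List.min?_eq_none_iff _ _).2 rfl]
    have hA2ne : (PySem.List.pyRange 0 (c0 + 1) 1).filter q ≠ [] := by
      obtain ⟨c, hcl, hcr, hcq⟩ := hex
      have hcmem : c ∈ PySem.List.pyRange 0 m 1 := PySem.List.mem_pyRange_one.2 ⟨hcl, hcr⟩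
      rw [hRsplit] at hcmem
      rcases List.mem_append.1 hcmem with h | h
      · exact List.ne_nil_of_mem (List.mem_filter.2 ⟨h, hcq⟩)
      · exact absurd (hA1c ▸ List.mem_filter.2 ⟨h, hcq⟩) (by simp)
    obtain ⟨y, t', hyt⟩ := List.exists_cons_of_ne_nil hA2ne
    rw [hRsplit, List.filter_append, hA1c, hyt]
    rw [min?_id_sorted _ (by rw [← hyt]; simpa using hPW2)]
    simp

-- core cyclic-successor lemma, downward scan, modulus m
lemma core_down (m : Int) (hm : 0 < m) (q : Int → Bool) (j : Int)
    (hex : ∃ c, 0 ≤ c ∧ c < m ∧ q c = true) :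
    ((List.range m.toNat).map (fun (k : Nat) => (j - 1 - (k : Int)) % m)).find? q
      = some (pvNextDown ((PySem.List.pyRange 0 m 1).filter q) (j % m)) := by
  set c0 := j % m with hc0
  have hc00 : 0 ≤ c0 := Int.emod_nonneg j (by omega)
  have hc01 : c0 < m := Int.emod_lt_of_pos j hm
  have hshift : ∀ t : Int, (j + t) % m = (c0 + t) % m := fun t => (Int.emod_add_emod j m t).symm
  have hsplit : (List.range m.toNat).map (fun (k : Nat) => (j - 1 - (k : Int)) % m)
      = (PySem.List.pyRange 0 c0 1).reverse ++ (PySem.List.pyRange c0 m 1).reverse := by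
    apply List.ext_getElem
    · simp [PySem.List.length_pyRange_one]; omega
    · intro k h1 h2
      simp only [List.getElem_map, List.getElem_range]
      have hkm : k < m.toNat := by simpa using h1
      have e1 : j - 1 - (k : Int) = j + (-1 - k) := by ring
      by_cases hk : k < c0.toNat
      · rw [List.getElem_append_left (by simp [List.length_reverse, PySem.List.length_pyRange_one]; omega)]
        rw [List.getElem_reverse, PySem.List.getElem_pyRange_one]
        rw [e1, hshift, Int.emod_eq_of_lt (by omega) (by omega)]
        simp only [List.length_reverse, PySem.List.length_pyRange_one]
        omega
      · rw [List.getElem_append_right (by simp [List.length_reverse, PySem.List.length_pyRange_one]; omega)]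
        rw [List.getElem_reverse, PySem.List.getElem_pyRange_one]
        rw [e1, hshift, emod_eq_add' m _ (by omega) (by omega)]
        simp only [List.length_reverse, PySem.List.length_pyRange_one]
        omega
  rw [hsplit, List.find?_append]
  have hRsplit : PySem.List.pyRange 0 m 1
      = PySem.List.pyRange 0 c0 1 ++ PySem.List.pyRange c0 m 1 :=
    PySem.List.pyRange_one_append 0 c0 m (by omega) (by omega)
  have hPW1 : ((PySem.List.pyRange 0 c0 1).filter q).Pairwise (· < ·) :=
    List.Pairwise.sublist List.filter_sublist (PySem.List.pairwise_lt_pyRange_one ..)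
  have hPW2 : ((PySem.List.pyRange c0 m 1).filter q).Pairwise (· < ·) :=
    List.Pairwise.sublist List.filter_sublist (PySem.List.pairwise_lt_pyRange_one ..)
  have hdown : ((PySem.List.pyRange 0 m 1).filter q).filter (fun c => decide (c < c0))
      = (PySem.List.pyRange 0 c0 1).filter q := by
    rw [hRsplit, List.filter_append, List.filter_append]
    have hs : ((PySem.List.pyRange 0 c0 1).filter q).filter (fun c => decide (c < c0))
        = (PySem.List.pyRange 0 c0 1).filter q := by
      apply List.filter_eq_self.2
      intro a ha
      have hmem := PySem.List.mem_pyRange_one.1 (List.mem_of_mem_filter ha)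
      simp; omega
    have hz : ((PySem.List.pyRange c0 m 1).filter q).filter (fun c => decide (c < c0)) = [] := by
      apply List.filter_eq_nil_iff.2
      intro a ha
      have hmem := PySem.List.mem_pyRange_one.1 (List.mem_of_mem_filter ha)
      simp; omega
    rw [hz, hs, List.append_nil]
  rw [find?_eq_head?_filter, find?_eq_head?_filter, List.filter_reverse, List.filter_reverse,
    List.head?_reverse, List.head?_reverse]
  unfold pvNextDown
  rw [hdown]
  rw [max?_id_sorted _ hPW1]
  cases hL : ((PySem.List.pyRange 0 c0 1).filter q).getLast? with
  | some v => simp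
  | none =>
    have hP1nil : (PySem.List.pyRange 0 c0 1).filter q = [] := List.getLast?_eq_none_iff.1 hL
    have hP2ne : (PySem.List.pyRange c0 m 1).filter q ≠ [] := by
      obtain ⟨c, hcl, hcr, hcq⟩ := hex
      have hcmem : c ∈ PySem.List.pyRange 0 m 1 := PySem.List.mem_pyRange_one.2 ⟨hcl, hcr⟩
      rw [hRsplit] at hcmem
      rcases List.mem_append.1 hcmem with h | h
      · exact absurd (hP1nil ▸ List.mem_filter.2 ⟨h, hcq⟩) (by simp)
      · exact List.ne_nil_of_mem (List.mem_filter.2 ⟨h, hcq⟩)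
    rw [hRsplit, List.filter_append, hP1nil, List.nil_append]
    rw [max?_id_sorted _ hPW2]
    have hsome : ((PySem.List.pyRange c0 m 1).filter q).getLast?.isSome := List.getLast?_isSome.2 hP2ne
    obtain ⟨w, hw⟩ := Option.isSome_iff_exists.1 hsome
    simp [hw]

-- per-direction loop characterizations
lemma main_hor_up (grid : List (Int × Int × String)) (i j : Int)
    (hex : ∃ e ∈ grid, e.1 = i % 200 ∧ 0 ≤ e.2.1 ∧ e.2.1 < 150) :
    move1Loop grid 0 1 400 i j
      = (i % 200, pvNextUp ((PySem.List.pyRange 0 150 1).filter (fun c => pvGridMem grid (i % 200, c))) (j % 150)) := by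
  set q : Int → Bool := fun c => pvGridMem grid (i % 200, c) with hq
  have hex' : ∃ c, 0 ≤ c ∧ c < 150 ∧ q c = true := by
    obtain ⟨e, he, h1, h2, h3⟩ := hex
    exact ⟨e.2.1, h2, h3, by rw [hq, ← h1]; exact pvGridMem_of_mem grid e.1 e.2.1 e.2.2 (by simpa using he)⟩
  have hcore := core_up 150 (by norm_num) q j hex'
  rw [show ((150 : Int).toNat) = 150 from rfl] at hcore
  have h400 := find?_range_mono q _ 150 400 (by norm_num) _ hcore
  apply loop_finds
  rw [cand_hu]
  rw [show (List.range 400).map (fun (k : Nat) => (i % 200, (j + 1 + (k : Int)) % 150))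
      = ((List.range 400).map (fun (k : Nat) => (j + 1 + (k : Int)) % 150)).map (fun c => (i % 200, c)) by
    rw [List.map_map]; rfl]
  rw [List.find?_map]
  rw [show ((fun p => pvGridMem grid p) ∘ (fun c => ((i % 200 : Int), c))) = q from rfl]
  rw [h400]
  rfl

lemma main_hor_down (grid : List (Int × Int × String)) (i j : Int)
    (hex : ∃ e ∈ grid, e.1 = i % 200 ∧ 0 ≤ e.2.1 ∧ e.2.1 < 150) :
    move1Loop grid 0 (-1) 400 i j
      = (i % 200, pvNextDown ((PySem.List.pyRange 0 150 1).filter (fun c => pvGridMem grid (i % 200, c))) (j % 150)) := by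
  set q : Int → Bool := fun c => pvGridMem grid (i % 200, c) with hq
  have hex' : ∃ c, 0 ≤ c ∧ c < 150 ∧ q c = true := by
    obtain ⟨e, he, h1, h2, h3⟩ := hex
    exact ⟨e.2.1, h2, h3, by rw [hq, ← h1]; exact pvGridMem_of_mem grid e.1 e.2.1 e.2.2 (by simpa using he)⟩
  have hcore := core_down 150 (by norm_num) q j hex'
  rw [show ((150 : Int).toNat) = 150 from rfl] at hcore
  have h400 := find?_range_mono q _ 150 400 (by norm_num) _ hcore
  apply loop_finds
  rw [cand_hd]
  rw [show (List.range 400).map (fun (k : Nat) => (i % 200, (j - 1 - (k : Int)) % 150))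
      = ((List.range 400).map (fun (k : Nat) => (j - 1 - (k : Int)) % 150)).map (fun c => (i % 200, c)) by
    rw [List.map_map]; rfl]
  rw [List.find?_map]
  rw [show ((fun p => pvGridMem grid p) ∘ (fun c => ((i % 200 : Int), c))) = q from rfl]
  rw [h400]
  rfl

lemma main_ver_up (grid : List (Int × Int × String)) (i j : Int)
    (hex : ∃ e ∈ grid, e.2.1 = j % 150 ∧ 0 ≤ e.1 ∧ e.1 < 200) :
    move1Loop grid 1 0 400 i j
      = (pvNextUp ((PySem.List.pyRange 0 200 1).filter (fun r => pvGridMem grid (r, j % 150))) (i % 200), j % 150) := by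
  set q : Int → Bool := fun r => pvGridMem grid (r, j % 150) with hq
  have hex' : ∃ c, 0 ≤ c ∧ c < 200 ∧ q c = true := by
    obtain ⟨e, he, h1, h2, h3⟩ := hex
    exact ⟨e.1, h2, h3, by rw [hq, ← h1]; exact pvGridMem_of_mem grid e.1 e.2.1 e.2.2 (by simpa using he)⟩
  have hcore := core_up 200 (by norm_num) q i hex'
  rw [show ((200 : Int).toNat) = 200 from rfl] at hcore
  have h400 := find?_range_mono q _ 200 400 (by norm_num) _ hcore
  apply loop_finds
  rw [cand_vu]
  rw [show (List.range 400).map (fun (k : Nat) => ((i + 1 + (k : Int)) % 200, j % 150))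
      = ((List.range 400).map (fun (k : Nat) => (i + 1 + (k : Int)) % 200)).map (fun r => (r, j % 150)) by
    rw [List.map_map]; rfl]
  rw [List.find?_map]
  rw [show ((fun p => pvGridMem grid p) ∘ (fun r => (r, (j % 150 : Int)))) = q from rfl]
  rw [h400]
  rfl

lemma main_ver_down (grid : List (Int × Int × String)) (i j : Int)
    (hex : ∃ e ∈ grid, e.2.1 = j % 150 ∧ 0 ≤ e.1 ∧ e.1 < 200) :
    move1Loop grid (-1) 0 400 i j
      = (pvNextDown ((PySem.List.pyRange 0 200 1).filter (fun r => pvGridMem grid (r, j % 150))) (i % 200), j % 150) := by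
  set q : Int → Bool := fun r => pvGridMem grid (r, j % 150) with hq
  have hex' : ∃ c, 0 ≤ c ∧ c < 200 ∧ q c = true := by
    obtain ⟨e, he, h1, h2, h3⟩ := hex
    exact ⟨e.1, h2, h3, by rw [hq, ← h1]; exact pvGridMem_of_mem grid e.1 e.2.1 e.2.2 (by simpa using he)⟩
  have hcore := core_down 200 (by norm_num) q i hex'
  rw [show ((200 : Int).toNat) = 200 from rfl] at hcore
  have h400 := find?_range_mono q _ 200 400 (by norm_num) _ hcore
  apply loop_finds
  rw [cand_vd]
  rw [show (List.range 400).map (fun (k : Nat) => ((i - 1 - (k : Int)) % 200, j % 150))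
      = ((List.range 400).map (fun (k : Nat) => (i - 1 - (k : Int)) % 200)).map (fun r => (r, j % 150)) by
    rw [List.map_map]; rfl]
  rw [List.find?_map]
  rw [show ((fun p => pvGridMem grid p) ∘ (fun r => (r, (j % 150 : Int)))) = q from rfl]
  rw [h400]
  rfl

-- ===== VERDICT (by name: the statement is the Claim_ definition above) =====
theorem move1_spec : Claim_equal_move1 := by
  unfold Claim_equal_move1
  intro grid d i j _ hpre
  obtain ⟨⟨h1, h2⟩, hline⟩ := hpre
  unfold Spec_move1
  interval_cases d
  · -- d = -4 : (0, 1)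
    rw [if_pos (by decide)] at hline
    simp only [pm200] at hline
    have hdir : PySem.List.pyGet? pvDirs (-4 : Int) = some ((0 : Int), (1 : Int)) := by decide
    simp only [move1, move1_alt, hdir, pm150, pm200]
    rw [main_hor_up grid i j hline]
    norm_num
  · -- d = -3 : (1, 0)
    rw [if_neg (by decide)] at hline
    simp only [pm150] at hline
    have hdir : PySem.List.pyGet? pvDirs (-3 : Int) = some ((1 : Int), (0 : Int)) := by decide
    simp only [move1, move1_alt, hdir, pm150, pm200]
    rw [main_ver_up grid i j hline]
    norm_num
  · -- d = -2 : (0, -1)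
    rw [if_pos (by decide)] at hline
    simp only [pm200] at hline
    have hdir : PySem.List.pyGet? pvDirs (-2 : Int) = some ((0 : Int), (-1 : Int)) := by decide
    simp only [move1, move1_alt, hdir, pm150, pm200]
    rw [main_hor_down grid i j hline]
    norm_num
  · -- d = -1 : (-1, 0)
    rw [if_neg (by decide)] at hline
    simp only [pm150] at hline
    have hdir : PySem.List.pyGet? pvDirs (-1 : Int) = some ((-1 : Int), (0 : Int)) := by decide
    simp only [move1, move1_alt, hdir, pm150, pm200]
    rw [main_ver_down grid i j hline]
    norm_num
  · -- d = 0 : (0, 1)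
    rw [if_pos (by decide)] at hline
    simp only [pm200] at hline
    have hdir : PySem.List.pyGet? pvDirs (0 : Int) = some ((0 : Int), (1 : Int)) := by decide
    simp only [move1, move1_alt, hdir, pm150, pm200]
    rw [main_hor_up grid i j hline]
    norm_num
  · -- d = 1 : (1, 0)
    rw [if_neg (by decide)] at hline
    simp only [pm150] at hline
    have hdir : PySem.List.pyGet? pvDirs (1 : Int) = some ((1 : Int), (0 : Int)) := by decide
    simp only [move1, move1_alt, hdir, pm150, pm200]
    rw [main_ver_up grid i j hline]
    norm_num
  · -- d = 2 : (0, -1)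
    rw [if_pos (by decide)] at hline
    simp only [pm200] at hline
    have hdir : PySem.List.pyGet? pvDirs (2 : Int) = some ((0 : Int), (-1 : Int)) := by decide
    simp only [move1, move1_alt, hdir, pm150, pm200]
    rw [main_hor_down grid i j hline]
    norm_num
  · -- d = 3 : (-1, 0)
    rw [if_neg (by decide)] at hline
    simp only [pm150] at hline
    have hdir : PySem.List.pyGet? pvDirs (3 : Int) = some ((-1 : Int), (0 : Int)) := by decide
    simp only [move1, move1_alt, hdir, pm150, pm200]
    rw [main_ver_down grid i j hline]
    norm_num
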